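-- pv_equiv track=rewrite | github.com/AsifSyedLive/cs_exchange_rate | exchange_rate/exchange_rate_preprocess.py | find_nearest_dates
-- ===== SOURCE A (Python) =====
-- def find_nearest_dates(rates_data, date):
--     """
--     Finds dates on the left/right side of the date passed as an argument inside the dictionary
--     This also works if more than one date is missing
--
--     Returns: two dates - previous date and next date available in dict
--     """
--     dates = list(rates_data.keys())
--     dates.sort()
--     prev_date, next_date = None, None
--     for iter_date in dates:
--         if iter_date <= date:
--             prev_date = iter_date
--         if iter_date >= date:
--             next_date = iter_date
--             break
--     return prev_date, next_date
-- ===== SOURCE B (Python) =====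
-- def find_nearest_dates(rates_data, date):
--     """Single pass over the keys, no sorting: prev is the max key <= date,
--     next is the min key >= date."""
--     keys = list(rates_data.keys())
--     prev_date = max((d for d in keys if d <= date), default=None)
--     next_date = min((d for d in keys if d >= date), default=None)
--     return prev_date, next_date
-- ===== Notes on version B (the rewrite author's own statement) =====
-- stated objective: faster
-- what changed: Replaces sort-then-linear-scan-with-break by a single unsorted pass: prev = max of keys <= date, next = min of keys >= date.
import Mathlib
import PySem

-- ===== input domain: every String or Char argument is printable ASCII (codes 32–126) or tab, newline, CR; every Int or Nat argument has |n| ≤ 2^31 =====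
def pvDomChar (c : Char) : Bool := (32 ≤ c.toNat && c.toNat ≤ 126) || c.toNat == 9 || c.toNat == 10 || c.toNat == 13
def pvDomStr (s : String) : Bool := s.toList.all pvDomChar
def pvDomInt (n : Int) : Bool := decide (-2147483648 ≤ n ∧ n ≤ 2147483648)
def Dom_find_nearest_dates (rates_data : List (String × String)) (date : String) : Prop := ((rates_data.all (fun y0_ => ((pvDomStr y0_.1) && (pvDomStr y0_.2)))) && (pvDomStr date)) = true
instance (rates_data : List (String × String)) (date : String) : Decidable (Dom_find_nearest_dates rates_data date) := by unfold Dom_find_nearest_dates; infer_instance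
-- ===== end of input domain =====

-- B replaces A's sort + linear scan with break by one unsorted pass taking max/min of the
-- filtered keys; equivalence of the return values is proved for all inputs.

-- ===== PORT A =====
-- the 'for iter_date in dates: …' loop with its break, carried accumulator prev_date
def fndLoopA (date : String) : List String → Option String → Option String × Option String
  | [], prev => (prev, none)
  | d :: ds, prev =>
    let prev' := if d ≤ date then some d else prev
    if date ≤ d then (prev', some d) else fndLoopA date ds prev'

def find_nearest_dates (rates_data : List (String × String)) (date : String) : Option String × Option String :=
  let dates := PySem.List.sorted ((PySem.Dict.ofList rates_data).keys) (fun x => x)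
  fndLoopA date dates none

-- ===== PORT B =====
def find_nearest_dates_alt (rates_data : List (String × String)) (date : String) : Option String × Option String :=
  let keys := (PySem.Dict.ofList rates_data).keys
  (PySem.List.max? (keys.filter (fun d => d ≤ date)) (fun x => x),
   PySem.List.min? (keys.filter (fun d => date ≤ d)) (fun x => x))

-- ===== PRECONDITION & SPEC =====
def Spec_find_nearest_dates (rates_data : List (String × String)) (date : String) (out : Option String × Option String) : Prop := out = find_nearest_dates_alt rates_data date
instance (rates_data : List (String × String)) (date : String) (out : Option String × Option String) : Decidable (Spec_find_nearest_dates rates_data date out) := by unfold Spec_find_nearest_dates; infer_instance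

-- ===== CLAIM (what is proved, stated in full; the proofs are below) =====
def Claim_equal_find_nearest_dates : Prop := ∀ (rates_data : List (String × String)) (date : String), Dom_find_nearest_dates rates_data date → Spec_find_nearest_dates rates_data date (find_nearest_dates rates_data date)

-- ===== LEMMAS AND PROOFS =====

-- max?/min? (with the identity key) are determined by membership plus the bound, so they are
-- invariant under permutation.
theorem max?_eq_some_of_isMax (l : List String) (m : String) (hm : m ∈ l)
    (hub : ∀ y ∈ l, y ≤ m) : PySem.List.max? l (fun x => x) = some m := by
  cases h : PySem.List.max? l (fun x => x) with
  | none =>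
      rw [PySem.List.max?_eq_none_iff] at h
      subst h; simp at hm
  | some m' =>
      have h1 : m ≤ m' := PySem.List.max?_isMax h m hm
      have h2 : m' ≤ m := hub m' (PySem.List.max?_mem h)
      exact congrArg some (le_antisymm h2 h1)

theorem min?_eq_some_of_isMin (l : List String) (m : String) (hm : m ∈ l)
    (hlb : ∀ y ∈ l, m ≤ y) : PySem.List.min? l (fun x => x) = some m := by
  cases h : PySem.List.min? l (fun x => x) with
  | none =>
      rw [PySem.List.min?_eq_none_iff] at h
      subst h; simp at hm
  | some m' =>
      have h1 : m' ≤ m := PySem.List.min?_isMin h m hm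
      have h2 : m ≤ m' := hlb m' (PySem.List.min?_mem h)
      exact congrArg some (le_antisymm h1 h2)

theorem max?_perm (l l' : List String) (hp : l.Perm l') :
    PySem.List.max? l (fun x => x) = PySem.List.max? l' (fun x => x) := by
  cases h : PySem.List.max? l (fun x => x) with
  | none =>
      rw [PySem.List.max?_eq_none_iff] at h
      subst h
      rw [List.nil_perm] at hp
      subst hp; rfl
  | some m =>
      exact (max?_eq_some_of_isMax l' m (hp.mem_iff.mp (PySem.List.max?_mem h))
        (fun y hy => PySem.List.max?_isMax h y (hp.mem_iff.mpr hy))).symm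

theorem min?_perm (l l' : List String) (hp : l.Perm l') :
    PySem.List.min? l (fun x => x) = PySem.List.min? l' (fun x => x) := by
  cases h : PySem.List.min? l (fun x => x) with
  | none =>
      rw [PySem.List.min?_eq_none_iff] at h
      subst h
      rw [List.nil_perm] at hp
      subst hp; rfl
  | some m =>
      exact (min?_eq_some_of_isMin l' m (hp.mem_iff.mp (PySem.List.min?_mem h))
        (fun y hy => PySem.List.min?_isMin h y (hp.mem_iff.mpr hy))).symm

-- On a strictly increasing list, A's loop returns (max of the ≤-filter, falling back to the
-- carried prev when that filter is empty; min of the ≥-filter).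
theorem fndLoopA_eq (date : String) (ds : List String) (prev : Option String)
    (hpw : ds.Pairwise (· < ·)) :
    fndLoopA date ds prev =
      ((match PySem.List.max? (ds.filter (fun d => d ≤ date)) (fun x => x) with
        | some m => some m
        | none => prev),
       PySem.List.min? (ds.filter (fun d => date ≤ d)) (fun x => x)) := by
  induction ds generalizing prev with
  | nil => simp [fndLoopA, PySem.List.max?, PySem.List.min?]
  | cons d t ih =>
      have hlt : ∀ y ∈ t, d < y := fun y hy => List.rel_of_pairwise_cons hpw hy
      have hpwt : t.Pairwise (· < ·) := hpw.of_cons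
      by_cases hge : date ≤ d
      · -- break
        have hfge : List.filter (fun d' => decide (date ≤ d')) (d :: t) =
            d :: t.filter (fun d' => decide (date ≤ d')) :=
          List.filter_cons_of_pos (decide_eq_true hge)
        have hmin : PySem.List.min? (List.filter (fun d' => decide (date ≤ d')) (d :: t)) (fun x => x) = some d := by
          rw [hfge]
          apply min?_eq_some_of_isMin
          · exact List.mem_cons_self
          · intro y hy
            rcases List.mem_cons.mp hy with h | h
            · exact le_of_eq h.symm
            · exact le_of_lt (hlt y (List.mem_of_mem_filter h))
        by_cases hle : d ≤ date
        · have hdd : d = date := le_antisymm hle hge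
          have hf : List.filter (fun d' => decide (d' ≤ date)) (d :: t) = [d] := by
            have hstep : List.filter (fun d' => decide (d' ≤ date)) (d :: t) =
                d :: List.filter (fun d' => decide (d' ≤ date)) t :=
              List.filter_cons_of_pos (decide_eq_true hle)
            rw [hstep]
            have : List.filter (fun d' => decide (d' ≤ date)) t = [] := by
              rw [List.filter_eq_nil_iff]
              intro y hy
              simp only [decide_eq_true_eq]
              intro hc
              exact absurd hc (not_le_of_gt (hdd ▸ hlt y hy))
            rw [this]
          simp only [fndLoopA, hle, hge, if_true]
          rw [hf, hmin]
          simp [PySem.List.max?]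
        · have hf : List.filter (fun d' => decide (d' ≤ date)) (d :: t) = [] := by
            rw [List.filter_eq_nil_iff]
            intro y hy
            simp only [decide_eq_true_eq]
            rcases List.mem_cons.mp hy with h | h
            · subst h; exact hle
            · intro hc
              exact hle (le_of_lt (lt_of_lt_of_le (hlt y h) hc))
          simp only [fndLoopA, hle, hge, if_true, if_false]
          rw [hf, hmin]
          simp [PySem.List.max?]
      · -- continue: d < date
        have hdlt : d < date := lt_of_not_ge hge
        have hle : d ≤ date := le_of_lt hdlt
        have hfle : List.filter (fun d' => decide (d' ≤ date)) (d :: t) =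
            d :: t.filter (fun d' => decide (d' ≤ date)) :=
          List.filter_cons_of_pos (decide_eq_true hle)
        have hfge : List.filter (fun d' => decide (date ≤ d')) (d :: t) =
            t.filter (fun d' => decide (date ≤ d')) :=
          List.filter_cons_of_neg (by simp [hge])
        simp only [fndLoopA, hle, hge, if_true, if_false]
        rw [ih (some d) hpwt, hfle, hfge]
        congr 1
        cases h : PySem.List.max? (t.filter (fun d' => decide (d' ≤ date))) (fun x => x) with
        | none =>
            have hnil : t.filter (fun d' => decide (d' ≤ date)) = [] :=
              (PySem.List.max?_eq_none_iff _ _).mp h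
            rw [hnil]
            rw [max?_eq_some_of_isMax [d] d (List.mem_singleton.mpr rfl)
              (by intro y hy; rw [List.mem_singleton] at hy; exact le_of_eq hy)]
        | some m =>
            have hmem : m ∈ t.filter (fun d' => decide (d' ≤ date)) := PySem.List.max?_mem h
            have hmax : PySem.List.max? (d :: t.filter (fun d' => decide (d' ≤ date))) (fun x => x) = some m := by
              refine max?_eq_some_of_isMax _ m (List.mem_cons_of_mem d hmem) ?_
              intro y hy
              rcases List.mem_cons.mp hy with h' | h'
              · exact h' ▸ le_of_lt (hlt m (List.mem_of_mem_filter hmem))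
              · exact PySem.List.max?_isMax h y h'
            rw [hmax]

-- ===== VERDICT (by name: the statement is the Claim_ definition above) =====
theorem find_nearest_dates_spec : Claim_equal_find_nearest_dates := by
  intro rates_data date _
  unfold Spec_find_nearest_dates find_nearest_dates find_nearest_dates_alt
  set ks := (PySem.Dict.ofList rates_data).keys with hks
  have hperm : (PySem.List.sorted ks (fun x => x)).Perm ks := PySem.List.sorted_perm ks (fun x => x) false
  have hnd : (PySem.List.sorted ks (fun x => x)).Nodup :=
    hperm.nodup_iff.mpr (PySem.Dict.nodup_keys_ofList rates_data)
  have hpw : (PySem.List.sorted ks (fun x => x)).Pairwise (· < ·) :=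
    ((PySem.List.sorted_pairwise ks (fun x => x)).and hnd).imp
      (fun h => lt_of_le_of_ne h.1 h.2)
  rw [fndLoopA_eq date _ none hpw]
  have h1 := max?_perm _ _ (hperm.filter (fun d => decide (d ≤ date)))
  have h2 := min?_perm _ _ (hperm.filter (fun d => decide (date ≤ d)))
  rw [h1, h2]
  show (match PySem.List.max? (ks.filter (fun d => decide (d ≤ date))) (fun x => x) with
        | some m => some m
        | none => (none : Option String),
        PySem.List.min? (ks.filter (fun d => decide (date ≤ d))) (fun x => x)) =
       (PySem.List.max? (ks.filter (fun d => decide (d ≤ date))) (fun x => x),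
        PySem.List.min? (ks.filter (fun d => decide (date ≤ d))) (fun x => x))
  cases PySem.List.max? (ks.filter (fun d => decide (d ≤ date))) (fun x => x) <;> rfl
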